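-- pv_equiv track=rewrite | github.com/melatonin355/sliding-window | solutions/solutions.py | find_longest_substring_with_ones_after_replacement
-- ===== SOURCE A (Python) =====
-- from typing import List
--
-- def find_longest_substring_with_ones_after_replacement(arr: List[int], k: int) -> int:
--     window_start = 0
--     max_subarray_length = 0
--     max_ones_count = 0
--
--     for window_end in range(len(arr)):
--         current_char = arr[window_end]
--         if current_char == 1:
--             max_ones_count += 1
--
--         window_length = (window_end + 1) - window_start
--         valid_subarray: bool = window_length - max_ones_count <= k
--
--         if not valid_subarray:
--             if arr[window_start] == 1:
--                 max_ones_count -= 1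
--             window_start += 1
--
--         window_length = (window_end + 1) - window_start
--         max_subarray_length = max(max_subarray_length, window_length)
--
--     return max_subarray_length
-- ===== SOURCE B (Python) =====
-- def find_longest_substring_with_ones_after_replacement(arr, k):
--     if k < 0:
--         return 0
--     zeros = [i for i, v in enumerate(arr) if v != 1]
--     if len(zeros) <= k:
--         return len(arr)
--     aug = [-1] + zeros + [len(arr)]
--     return max(aug[j + k + 1] - aug[j] - 1 for j in range(len(zeros) - k + 1))
-- ===== Notes on version B (the rewrite author's own statement) =====
-- stated objective: alternative
-- what changed: Replaces the per-element two-pointer sliding window by precomputing the list of indices of non-1 elements and taking the maximum span between the zero-index before and the zero-index after each group of k consecutive flippable zeros (with -1/len(arr) sentinels), answering len(arr) directly when there are at most k zeros.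
import Mathlib
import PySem

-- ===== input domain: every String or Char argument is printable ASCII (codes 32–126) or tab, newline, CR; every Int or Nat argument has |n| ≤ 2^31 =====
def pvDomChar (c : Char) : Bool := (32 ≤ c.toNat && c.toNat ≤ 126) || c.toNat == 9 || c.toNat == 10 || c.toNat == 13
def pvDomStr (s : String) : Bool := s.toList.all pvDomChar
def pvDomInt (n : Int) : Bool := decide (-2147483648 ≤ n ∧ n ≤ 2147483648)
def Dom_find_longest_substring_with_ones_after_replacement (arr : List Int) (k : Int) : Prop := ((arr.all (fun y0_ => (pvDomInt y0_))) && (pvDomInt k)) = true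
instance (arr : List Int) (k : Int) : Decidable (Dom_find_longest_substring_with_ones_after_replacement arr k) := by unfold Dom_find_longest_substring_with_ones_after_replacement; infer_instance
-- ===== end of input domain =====

-- B replaces A's per-element two-pointer sliding window by a scan over the table of indices of
-- the non-one elements (max span around each group of k consecutive such indices); a different algorithm of the same cost.

-- ===== PORT A =====
-- loop body of A's for-loop; state = (window_start, max_subarray_length, max_ones_count)
def stepA (arr : List Int) (k : Int) (st : Int × Int × Int) (window_end : Int) : Int × Int × Int :=
  let ws := st.1
  let msl := st.2.1
  let moc := st.2.2
  let current_char := PySem.List.pyGetD arr window_end 0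
  let moc := if current_char = 1 then moc + 1 else moc
  let window_length := (window_end + 1) - ws
  let valid : Bool := decide (window_length - moc ≤ k)
  let p :=
    if ¬ valid then
      (ws + 1, if PySem.List.pyGetD arr ws 0 = 1 then moc - 1 else moc)
    else (ws, moc)
  let window_length := (window_end + 1) - p.1
  (p.1, max msl window_length, p.2)

def find_longest_substring_with_ones_after_replacement (arr : List Int) (k : Int) : Int :=
  ((PySem.List.pyRange 0 (arr.length : Int) 1).foldl (stepA arr k) (0, 0, 0)).2.1

-- ===== PORT B =====
def find_longest_substring_with_ones_after_replacement_alt (arr : List Int) (k : Int) : Int :=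
  if k < 0 then 0
  else
    let zeros : List Int := ((PySem.List.enumerate arr 0).filter (fun p => p.2 ≠ 1)).map (·.1)
    if (zeros.length : Int) ≤ k then (arr.length : Int)
    else
      let aug : List Int := [-1] ++ zeros ++ [(arr.length : Int)]
      let spans := (PySem.List.pyRange 0 ((zeros.length : Int) - k + 1) 1).map
        (fun j => PySem.List.pyGetD aug (j + k + 1) 0 - PySem.List.pyGetD aug j 0 - 1)
      match spans with
      | [] => 0
      | x :: t => t.foldl max x

-- ===== PRECONDITION & SPEC =====
def Spec_find_longest_substring_with_ones_after_replacement (arr : List Int) (k : Int) (out : Int) : Prop := out = find_longest_substring_with_ones_after_replacement_alt arr k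
instance (arr : List Int) (k : Int) (out : Int) : Decidable (Spec_find_longest_substring_with_ones_after_replacement arr k out) := by unfold Spec_find_longest_substring_with_ones_after_replacement; infer_instance

-- ===== CLAIM (what is proved, stated in full; the proofs are below) =====
def Claim_equal_find_longest_substring_with_ones_after_replacement : Prop := ∀ (arr : List Int) (k : Int), Dom_find_longest_substring_with_ones_after_replacement arr k → Spec_find_longest_substring_with_ones_after_replacement arr k (find_longest_substring_with_ones_after_replacement arr k)

-- ===== LEMMAS AND PROOFS =====

def zcnt (arr : List Int) (i j : Nat) : Nat :=
  ((arr.drop i).take (j - i)).countP (fun x => decide (x ≠ 1))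

theorem zcnt_self (arr : List Int) (i : Nat) : zcnt arr i i = 0 := by
  simp [zcnt]

theorem zcnt_split (arr : List Int) {i m j : Nat} (him : i ≤ m) (hmj : m ≤ j) :
    zcnt arr i j = zcnt arr i m + zcnt arr m j := by
  unfold zcnt
  have h1 : j - i = (m - i) + (j - m) := by omega
  have hd : List.drop (m - i) (List.drop i arr) = List.drop m arr := by
    rw [List.drop_drop]; congr 1; omega
  rw [h1, List.take_add, List.countP_append, hd]

theorem zcnt_le_len (arr : List Int) (i j : Nat) : zcnt arr i j ≤ j - i := by
  calc zcnt arr i j ≤ ((arr.drop i).take (j - i)).length := List.countP_le_length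
    _ ≤ j - i := by simp

theorem zcnt_succ (arr : List Int) {i j : Nat} (hij : i ≤ j) (hj : j < arr.length) :
    zcnt arr i (j + 1) = zcnt arr i j + (if arr[j] ≠ 1 then 1 else 0) := by
  have h1 : j + 1 - i = (j - i) + 1 := by omega
  unfold zcnt
  rw [h1, List.take_add_one, List.countP_append]
  have hlt : j - i < (arr.drop i).length := by simp; omega
  rw [List.getElem?_eq_getElem hlt]
  have he : (arr.drop i)[j - i] = arr[j]'hj := by
    rw [List.getElem_drop]; congr 1; omega
  simp only [Option.toList_some, List.countP_cons, List.countP_nil, he]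
  split <;> simp_all

theorem zcnt_head (arr : List Int) {i j : Nat} (hij : i < j) (hi : i < arr.length) :
    zcnt arr i j = (if arr[i] ≠ 1 then 1 else 0) + zcnt arr (i + 1) j := by
  unfold zcnt
  rw [List.drop_eq_getElem_cons hi]
  have h1 : j - i = (j - (i+1)) + 1 := by omega
  rw [h1, List.take_succ_cons, List.countP_cons]
  simp only [Nat.add_comm]
  split <;> simp_all

def sA (arr : List Int) (k : Int) : Nat → Nat
  | 0 => 0
  | e + 1 => if ((zcnt arr (sA arr k e) (e + 1) : Int) > k) then sA arr k e + 1 else sA arr k e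

theorem sA_le (arr : List Int) (k : Int) (e : Nat) : sA arr k e ≤ e := by
  induction e with
  | zero => simp [sA]
  | succ e ih => simp only [sA]; split <;> omega

theorem sA_step (arr : List Int) (k : Int) (e : Nat) :
    sA arr k e ≤ sA arr k (e + 1) ∧ sA arr k (e + 1) ≤ sA arr k e + 1 := by
  simp only [sA]; split <;> omega

theorem zcnt_mono (arr : List Int) {i j j' : Nat} (hij : i ≤ j) (h : j ≤ j') :
    zcnt arr i j ≤ zcnt arr i j' := by
  rw [zcnt_split arr hij h]; omega

theorem sA_diff_succ (arr : List Int) (k : Int) (e : Nat) :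
    e - sA arr k e ≤ (e + 1) - sA arr k (e + 1) := by
  have h1 := sA_step arr k e
  have h2 := sA_le arr k e
  omega

theorem sA_diff_mono (arr : List Int) (k : Int) {e e' : Nat} (h : e ≤ e') :
    e - sA arr k e ≤ e' - sA arr k e' := by
  induction e' with
  | zero => have : e = 0 := by omega
            subst this; exact le_rfl
  | succ e' ih =>
    rcases Nat.lt_or_ge e (e' + 1) with h1 | h1
    · exact le_trans (ih (by omega)) (sA_diff_succ arr k e')
    · have : e = e' + 1 := by omega
      subst this; exact le_rfl

theorem sA_invalid (arr : List Int) (k : Int) (e : Nat) :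
    ∀ i, i < sA arr k e → ((zcnt arr i e : Int) > k) := by
  induction e with
  | zero => simp [sA]
  | succ e ih =>
    intro i hi
    have hle := sA_le arr k e
    simp only [sA] at hi
    split at hi
    · rename_i hcond
      rcases Nat.lt_or_ge i (sA arr k e) with h1 | h1
      · have := ih i h1
        have hm : zcnt arr i e ≤ zcnt arr i (e + 1) := zcnt_mono arr (by omega) (by omega)
        omega
      · have : i = sA arr k e := by omega
        subst this; exact hcond
    · rename_i hcond
      have := ih i hi
      have hm : zcnt arr i e ≤ zcnt arr i (e + 1) := zcnt_mono arr (by omega) (by omega)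
      omega

theorem sA_achiev (arr : List Int) (k : Int) (e : Nat) :
    sA arr k e = e ∨ ∃ i j : Nat, i ≤ j ∧ j ≤ e ∧ j - i = e - sA arr k e ∧ ((zcnt arr i j : Int) ≤ k) := by
  induction e with
  | zero => left; simp [sA]
  | succ e ih =>
    have hle := sA_le arr k e
    simp only [sA]
    split
    · rename_i hcond
      rcases ih with h | ⟨i, j, h1, h2, h3, h4⟩
      · left; omega
      · right; exact ⟨i, j, h1, by omega, by omega, h4⟩
    · rename_i hcond
      right
      exact ⟨sA arr k e, e + 1, by omega, le_rfl, by omega, by omega⟩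

theorem valid_le (arr : List Int) (k : Int) {i j : Nat} (hij : i ≤ j) (hj : j ≤ arr.length)
    (hv : (zcnt arr i j : Int) ≤ k) :
    (j : Int) - i ≤ (arr.length : Int) - sA arr k arr.length := by
  have hsj : sA arr k j ≤ i := by
    by_contra h
    exact absurd hv (by simpa using sA_invalid arr k j i (by omega))
  have h1 : j - sA arr k j ≤ arr.length - sA arr k arr.length := sA_diff_mono arr k hj
  have h2 := sA_le arr k j
  have h3 := sA_le arr k arr.length
  omega

def zidx : List Int → Nat → List Nat
  | [], _ => []
  | x :: xs, i => if x ≠ 1 then i :: zidx xs (i + 1) else zidx xs (i + 1)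

theorem zidx_mem (arr : List Int) : ∀ (s : Nat), ∀ x ∈ zidx arr s, s ≤ x ∧ x < s + arr.length := by
  induction arr with
  | nil => intro s x hx; simp [zidx] at hx
  | cons a t ih =>
    intro s x hx
    simp only [zidx] at hx
    split at hx
    · rcases List.mem_cons.mp hx with h | h
      · subst h; simp only [List.length_cons]; omega
      · have := ih (s + 1) x h; simp at this ⊢; omega
    · have := ih (s + 1) x hx; simp at this ⊢; omega

theorem zidx_sorted (arr : List Int) : ∀ (s : Nat), (zidx arr s).Pairwise (· < ·) := by
  induction arr with
  | nil => intro s; simp [zidx]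
  | cons a t ih =>
    intro s
    simp only [zidx]
    split
    · exact List.pairwise_cons.mpr ⟨fun x hx => by have := zidx_mem t (s + 1) x hx; omega, ih (s + 1)⟩
    · exact ih (s + 1)

theorem zidx_countP (arr : List Int) : ∀ (s m : Nat),
    (zidx arr s).countP (fun x => decide (x < s + m)) = zcnt arr 0 m := by
  induction arr with
  | nil => intro s m; simp [zidx, zcnt]
  | cons a t ih =>
    intro s m
    match m with
    | 0 =>
      simp only [Nat.add_zero]
      rw [zcnt_self]
      apply List.countP_eq_zero.mpr
      intro x hx
      have := zidx_mem (a :: t) s x hx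
      simp only [decide_eq_true_eq]
      omega
    | m' + 1 =>
      have hz : zcnt (a :: t) 0 (m' + 1) = (if a ≠ 1 then 1 else 0) + zcnt t 0 m' := by
        unfold zcnt
        simp only [List.drop_zero, Nat.sub_zero, List.take_succ_cons, List.countP_cons]
        split <;> simp_all <;> omega
      simp only [zidx]
      split
      · rename_i ha
        rw [List.countP_cons, hz]
        have h1 : (zidx t (s + 1)).countP (fun x => decide (x < s + (m' + 1)))
            = (zidx t (s + 1)).countP (fun x => decide (x < (s + 1) + m')) := by
          congr 1; funext x; congr 1; simp; omega
        rw [h1, ih (s + 1) m']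
        simp [ha]; omega
      · rename_i ha
        rw [hz]
        have h1 : (zidx t (s + 1)).countP (fun x => decide (x < s + (m' + 1)))
            = (zidx t (s + 1)).countP (fun x => decide (x < (s + 1) + m')) := by
          congr 1; funext x; congr 1; simp; omega
        rw [h1, ih (s + 1) m']
        simp at ha; simp [ha]

theorem zidx_len (arr : List Int) : ∀ (s : Nat), (zidx arr s).length = zcnt arr 0 arr.length := by
  induction arr with
  | nil => intro s; simp [zidx, zcnt]
  | cons a t ih =>
    intro s
    have hz : zcnt (a :: t) 0 (t.length + 1) = (if a ≠ 1 then 1 else 0) + zcnt t 0 t.length := by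
      unfold zcnt
      simp only [List.drop_zero, Nat.sub_zero, List.take_succ_cons, List.countP_cons]
      split <;> simp_all <;> omega
    simp only [List.length_cons, hz, zidx]
    split <;> rename_i ha
    · simp [ih (s + 1), ha]; omega
    · simp at ha; simp [ih (s + 1), ha]

theorem zeros_eq (arr : List Int) : ∀ (s : Nat),
    ((PySem.List.enumerate arr (s : Int)).filter (fun p => p.2 ≠ 1)).map (·.1)
      = (zidx arr s).map (fun i : Nat => (i : Int)) := by
  induction arr with
  | nil => intro s; simp [PySem.List.enumerate_nil, zidx]
  | cons a t ih =>
    intro s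
    rw [PySem.List.enumerate_cons]
    have hc : ((s : Int) + 1) = ((s + 1 : Nat) : Int) := by push_cast; ring
    by_cases ha : a = 1
    · have h0 : (decide (((s:Int), a).2 ≠ 1)) = false := by simp [ha]
      simp only [List.filter_cons, h0, Bool.false_eq_true, if_false, hc, ih (s + 1)]
      simp [zidx, ha]
    · have h0 : (decide (((s:Int), a).2 ≠ 1)) = true := by simp [ha]
      simp only [List.filter_cons, h0, if_true, List.map_cons, hc, ih (s + 1)]
      simp [zidx, ha]

theorem sorted_countP_lt_getElem : ∀ (l : List Nat), l.Pairwise (· < ·) →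
    ∀ (g : Nat) (h : g < l.length), l.countP (fun x => decide (x < l[g])) = g := by
  intro l
  induction l with
  | nil => intro _ g h; simp at h
  | cons a t ih =>
    intro hs g h
    have hat := (List.pairwise_cons.mp hs).1
    have hts := (List.pairwise_cons.mp hs).2
    match g with
    | 0 =>
      show List.countP (fun x => decide (x < a)) (a :: t) = 0
      rw [List.countP_cons]
      have h1 : t.countP (fun x => decide (x < a)) = 0 :=
        List.countP_eq_zero.mpr (fun x hx => by have := hat x hx; simp; omega)
      rw [h1]; simp
    | g' + 1 =>
      have h2 : g' < t.length := by simpa using Nat.lt_of_succ_lt_succ h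
      show List.countP (fun x => decide (x < t[g'])) (a :: t) = g' + 1
      rw [List.countP_cons, ih hts g' h2]
      have h1 : a < t[g'] := hat _ (List.getElem_mem h2)
      simp [h1]

theorem sorted_countP_le_getElem : ∀ (l : List Nat), l.Pairwise (· < ·) →
    ∀ (g : Nat) (h : g < l.length), l.countP (fun x => decide (x < l[g] + 1)) = g + 1 := by
  intro l
  induction l with
  | nil => intro _ g h; simp at h
  | cons a t ih =>
    intro hs g h
    have hat := (List.pairwise_cons.mp hs).1
    have hts := (List.pairwise_cons.mp hs).2
    match g with
    | 0 =>
      show List.countP (fun x => decide (x < a + 1)) (a :: t) = 0 + 1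
      rw [List.countP_cons]
      have h1 : t.countP (fun x => decide (x < a + 1)) = 0 :=
        List.countP_eq_zero.mpr (fun x hx => by have := hat x hx; simp; omega)
      rw [h1]; simp
    | g' + 1 =>
      have h2 : g' < t.length := by simpa using Nat.lt_of_succ_lt_succ h
      show List.countP (fun x => decide (x < t[g'] + 1)) (a :: t) = g' + 1 + 1
      rw [List.countP_cons, ih hts g' h2]
      have h1 : a < t[g'] := hat _ (List.getElem_mem h2)
      have h3 : a < t[g'] + 1 := by omega
      simp [h3]

theorem sorted_getElem_lt : ∀ (l : List Nat), l.Pairwise (· < ·) →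
    ∀ (g m : Nat) (h : g < l.length), l[g] < m → g + 1 ≤ l.countP (fun x => decide (x < m)) := by
  intro l
  induction l with
  | nil => intro _ g m h; simp at h
  | cons a t ih =>
    intro hs g m h hlt
    have hat := (List.pairwise_cons.mp hs).1
    have hts := (List.pairwise_cons.mp hs).2
    rw [List.countP_cons]
    match g with
    | 0 =>
      have hlt' : a < m := by simpa using hlt
      simp [hlt']
    | g' + 1 =>
      have h2 : g' < t.length := by simpa using Nat.lt_of_succ_lt_succ h
      have hlt' : t[g'] < m := by simpa using hlt
      have h3 := ih hts g' m h2 hlt'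
      have h4 : a < m := by
        have := hat _ (List.getElem_mem h2); omega
      simp [h4]; omega

theorem sorted_lt_getElem : ∀ (l : List Nat), l.Pairwise (· < ·) →
    ∀ (g m : Nat) (h : g < l.length), g < l.countP (fun x => decide (x < m)) → l[g] < m := by
  intro l
  induction l with
  | nil => intro _ g m h; simp at h
  | cons a t ih =>
    intro hs g m h hcnt
    have hat := (List.pairwise_cons.mp hs).1
    have hts := (List.pairwise_cons.mp hs).2
    rw [List.countP_cons] at hcnt
    match g with
    | 0 =>
      show a < m
      by_contra hma
      have h1 : t.countP (fun x => decide (x < m)) = 0 :=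
        List.countP_eq_zero.mpr (fun x hx => by have := hat x hx; simp; omega)
      rw [h1] at hcnt
      have h4 : (if decide (a < m) = true then 1 else 0) = 0 := by
        simp; omega
      omega
    | g' + 1 =>
      have h2 : g' < t.length := by simpa using Nat.lt_of_succ_lt_succ h
      show t[g'] < m
      apply ih hts g' m h2
      have h5 : (if decide (a < m) = true then 1 else 0) ≤ 1 := by split <;> omega
      omega

theorem stepA_eq (arr : List Int) (k : Int) (e s : Nat) (he : e < arr.length) (hs : s ≤ e)
    (s' : Nat) (hs' : s' = if ((zcnt arr s (e + 1) : Int) > k) then s + 1 else s) :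
    stepA arr k ((s : Int), (e : Int) - s, ((e : Int) - s) - zcnt arr s e) (e : Int)
      = ((s' : Int), ((e : Int) + 1) - s', (((e : Int) + 1) - s') - zcnt arr s' (e + 1)) := by
  subst hs'
  have hse : s < arr.length := lt_of_le_of_lt hs he
  have hc : PySem.List.pyGetD arr (e : Int) 0 = arr[e] := by
    simp [PySem.List.pyGetD_natCast, List.getD_eq_getElem?_getD, List.getElem?_eq_getElem he]
  have hcs : PySem.List.pyGetD arr (s : Int) 0 = arr[s] := by
    simp [PySem.List.pyGetD_natCast, List.getD_eq_getElem?_getD, List.getElem?_eq_getElem hse]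
  have hsucc := zcnt_succ arr (i := s) hs he
  have hhead := zcnt_head arr (i := s) (j := e + 1) (by omega) hse
  have hb1 : zcnt arr s e ≤ e - s := zcnt_le_len arr s e
  have hb2 : zcnt arr (s + 1) (e + 1) ≤ (e + 1) - (s + 1) := zcnt_le_len arr (s + 1) (e + 1)
  by_cases h1 : arr[e] = 1 <;> by_cases h2 : arr[s] = 1
  · have A1 : zcnt arr s (e + 1) = zcnt arr s e := by rw [hsucc]; simp [h1]
    have A2 : zcnt arr s (e + 1) = zcnt arr (s + 1) (e + 1) := by rw [hhead]; simp [h2]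
    simp [stepA, hc, hcs, h1, h2, Prod.ext_iff]
    split_ifs <;> (refine ⟨?_, ?_, ?_⟩ <;> (push_cast at A1 A2 hb1 hb2 ⊢; omega))
  · have A1 : zcnt arr s (e + 1) = zcnt arr s e := by rw [hsucc]; simp [h1]
    have A2 : zcnt arr s (e + 1) = 1 + zcnt arr (s + 1) (e + 1) := by rw [hhead]; simp [h2]
    simp [stepA, hc, hcs, h1, h2, Prod.ext_iff]
    split_ifs <;> (refine ⟨?_, ?_, ?_⟩ <;> (push_cast at A1 A2 hb1 hb2 ⊢; omega))
  · have A1 : zcnt arr s (e + 1) = zcnt arr s e + 1 := by rw [hsucc]; simp [h1]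
    have A2 : zcnt arr s (e + 1) = zcnt arr (s + 1) (e + 1) := by rw [hhead]; simp [h2]
    simp [stepA, hc, hcs, h1, h2, Prod.ext_iff]
    split_ifs <;> (refine ⟨?_, ?_, ?_⟩ <;> (push_cast at A1 A2 hb1 hb2 ⊢; omega))
  · have A1 : zcnt arr s (e + 1) = zcnt arr s e + 1 := by rw [hsucc]; simp [h1]
    have A2 : zcnt arr s (e + 1) = 1 + zcnt arr (s + 1) (e + 1) := by rw [hhead]; simp [h2]
    simp [stepA, hc, hcs, h1, h2, Prod.ext_iff]
    split_ifs <;> (refine ⟨?_, ?_, ?_⟩ <;> (push_cast at A1 A2 hb1 hb2 ⊢; omega))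

theorem foldA (arr : List Int) (k : Int) : ∀ (e : Nat), e ≤ arr.length →
    (PySem.List.pyRange 0 (e : Int) 1).foldl (stepA arr k) (0, 0, 0) =
      ((sA arr k e : Int), (e : Int) - sA arr k e,
        ((e : Int) - sA arr k e) - zcnt arr (sA arr k e) e) := by
  intro e
  induction e with
  | zero =>
    intro _
    rw [PySem.List.pyRange_one_eq_nil (by simp)]
    simp [sA, zcnt_self]
  | succ e ih =>
    intro he
    have he' : e < arr.length := by omega
    have hc : ((e + 1 : Nat) : Int) = (e : Int) + 1 := by push_cast; ring
    rw [hc, PySem.List.pyRange_one_succ_right (by positivity), List.foldl_append,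
      ih (by omega)]
    simp only [List.foldl_cons, List.foldl_nil]
    exact stepA_eq arr k e (sA arr k e) he' (sA_le arr k e) (sA arr k (e + 1)) (by simp [sA])

theorem A_eq (arr : List Int) (k : Int) :
    find_longest_substring_with_ones_after_replacement arr k
      = (arr.length : Int) - sA arr k arr.length := by
  unfold find_longest_substring_with_ones_after_replacement
  rw [foldA arr k arr.length le_rfl]

def augL (arr : List Int) : List Int :=
  -1 :: ((zidx arr 0).map (fun i : Nat => (i : Int)) ++ [(arr.length : Int)])

def Fspan (arr : List Int) (K jn : Nat) : Int :=
  (augL arr).getD (jn + K + 1) 0 - (augL arr).getD jn 0 - 1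

theorem cnt0 (arr : List Int) (m : Nat) :
    (zidx arr 0).countP (fun x => decide (x < m)) = zcnt arr 0 m := by
  simpa using zidx_countP arr 0 m

theorem zs_lt_n (arr : List Int) : ∀ x ∈ zidx arr 0, x < arr.length := by
  intro x hx; have := zidx_mem arr 0 x hx; omega

theorem cnt_all (arr : List Int) :
    (zidx arr 0).countP (fun x => decide (x < arr.length)) = (zidx arr 0).length :=
  List.countP_eq_length.mpr (fun x hx => by simpa using zs_lt_n arr x hx)

theorem augL_get0 (arr : List Int) : (augL arr).getD 0 0 = -1 := rfl

theorem augL_get_mid (arr : List Int) (t : Nat) (h1 : 1 ≤ t) (h2 : t ≤ (zidx arr 0).length) :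
    (augL arr).getD t 0 = ((zidx arr 0)[t - 1]'(by omega) : Int) := by
  obtain ⟨t', rfl⟩ : ∃ t', t = t' + 1 := ⟨t - 1, by omega⟩
  have ht' : t' < ((zidx arr 0).map (fun i : Nat => (i : Int))).length := by
    simpa using (by omega : t' < (zidx arr 0).length)
  unfold augL
  rw [List.getD_cons_succ]
  rw [List.getD_eq_getElem _ _ (by simp; simp at ht'; omega)]
  rw [List.getElem_append_left ht']
  simp

theorem augL_get_last (arr : List Int) :
    (augL arr).getD ((zidx arr 0).length + 1) 0 = (arr.length : Int) := by
  unfold augL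
  rw [List.getD_cons_succ]
  rw [List.getD_eq_getElem _ _ (by simp)]
  rw [List.getElem_append_right (by simp)]
  simp

-- the left end of group jn: augL[jn] = i - 1 with exactly jn zeros before i,
-- and i is below every zero from position jn on, and below n
theorem lo_spec (arr : List Int) (jn : Nat) (hjn : jn ≤ (zidx arr 0).length) :
    ∃ i : Nat, (augL arr).getD jn 0 = (i : Int) - 1 ∧ zcnt arr 0 i = jn ∧
      i ≤ arr.length ∧ ∀ g, jn ≤ g → (hg : g < (zidx arr 0).length) → i ≤ (zidx arr 0)[g] := by
  rcases Nat.eq_zero_or_pos jn with hj0 | hj1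
  · subst hj0
    refine ⟨0, by rw [augL_get0]; norm_num, by simp [zcnt_self], by omega, fun g _ _ => by omega⟩
  · have hlt : jn - 1 < (zidx arr 0).length := by omega
    refine ⟨(zidx arr 0)[jn - 1] + 1, ?_, ?_, ?_, ?_⟩
    · rw [augL_get_mid arr jn hj1 hjn]; push_cast; ring
    · have := sorted_countP_le_getElem (zidx arr 0) (zidx_sorted arr 0) (jn - 1) hlt
      rw [cnt0] at this; rw [this]; omega
    · have := zs_lt_n arr _ (List.getElem_mem hlt); omega
    · intro g hg hgZ
      rcases Nat.eq_or_lt_of_le hg with h | h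
      · have : jn - 1 = g - 1 := by omega
        have hgg : (zidx arr 0)[jn - 1] < (zidx arr 0)[g] ∨ jn - 1 = g := by
          rcases Nat.lt_or_ge (jn - 1) g with hh | hh
          · exact Or.inl ((List.pairwise_iff_getElem.mp (zidx_sorted arr 0)) _ _ _ _ hh)
          · exact Or.inr (by omega)
        rcases hgg with hh | hh
        · omega
        · omega
      · have := (List.pairwise_iff_getElem.mp (zidx_sorted arr 0)) (jn - 1) g hlt hgZ (by omega)
        omega

-- the right end of group jn: augL[jn+K+1] = j with exactly jn+K zeros before j, j ≤ n
theorem hi_spec (arr : List Int) (K jn : Nat) (hKZ : K < (zidx arr 0).length)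
    (hjn : jn ≤ (zidx arr 0).length - K) :
    ∃ j : Nat, (augL arr).getD (jn + K + 1) 0 = (j : Int) ∧ zcnt arr 0 j = jn + K ∧
      j ≤ arr.length ∧ (∀ (hlt : jn + K < (zidx arr 0).length), j = (zidx arr 0)[jn + K]'hlt) ∧
      (jn + K = (zidx arr 0).length → j = arr.length) := by
  rcases Nat.lt_or_ge (jn + K) (zidx arr 0).length with h | h
  · refine ⟨(zidx arr 0)[jn + K], ?_, ?_, ?_, fun _ => rfl, fun hh => by omega⟩
    · rw [augL_get_mid arr (jn + K + 1) (by omega) (by omega)]; simp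
    · have := sorted_countP_lt_getElem (zidx arr 0) (zidx_sorted arr 0) (jn + K) h
      rw [cnt0] at this; rw [this]
    · have := zs_lt_n arr _ (List.getElem_mem h); omega
  · have hh : jn + K = (zidx arr 0).length := by omega
    refine ⟨arr.length, ?_, ?_, le_rfl, fun hc => by omega, fun _ => rfl⟩
    · rw [hh, augL_get_last arr]
    · have := cnt_all arr
      rw [cnt0] at this
      rw [this, hh]

theorem span_le (arr : List Int) (k : Int) (K jn : Nat) (hK : (K : Int) = k)
    (hKZ : K < (zidx arr 0).length) (hjn : jn ≤ (zidx arr 0).length - K) :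
    Fspan arr K jn ≤ (arr.length : Int) - sA arr k arr.length := by
  obtain ⟨i, hlo, hci, hin, hizs⟩ := lo_spec arr jn (by omega)
  obtain ⟨j, hhi, hcj, hjn', hjc1, hjc2⟩ := hi_spec arr K jn hKZ hjn
  have hij : i ≤ j := by
    rcases Nat.lt_or_ge (jn + K) (zidx arr 0).length with h | h
    · have := hizs (jn + K) (by omega) h
      rw [hjc1 h]; omega
    · rw [hjc2 (by omega)]; omega
  have hzij : (zcnt arr i j : Int) ≤ k := by
    have := zcnt_split arr (Nat.zero_le i) hij
    rw [hci, hcj] at this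
    omega
  have := valid_le arr k hij hjn' hzij
  unfold Fspan
  rw [hlo, hhi]
  omega

theorem rev_span (arr : List Int) (k : Int) (K : Nat) (hK : (K : Int) = k)
    (hKZ : K < (zidx arr 0).length) (i j : Nat) (hij : i ≤ j) (hjn : j ≤ arr.length)
    (hv : (zcnt arr i j : Int) ≤ k) :
    ∃ jn, jn < (zidx arr 0).length - K + 1 ∧ (j : Int) - (i : Int) ≤ Fspan arr K jn := by
  set Z := (zidx arr 0).length with hZ
  set c := zcnt arr 0 i with hc
  refine ⟨min c (Z - K), by omega, ?_⟩
  have hg : min c (Z - K) ≤ Z - K := by omega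
  have hlo : (augL arr).getD (min c (Z - K)) 0 < (i : Int) := by
    rcases Nat.eq_zero_or_pos (min c (Z - K)) with h0 | h1
    · rw [h0, augL_get0]; omega
    · rw [augL_get_mid arr _ h1 (by omega)]
      have hlt : min c (Z - K) - 1 < Z := by omega
      have := sorted_lt_getElem (zidx arr 0) (zidx_sorted arr 0) (min c (Z - K) - 1) i hlt
        (by rw [cnt0]; omega)
      exact_mod_cast by exact_mod_cast this
  have hhi : (j : Int) ≤ (augL arr).getD (min c (Z - K) + K + 1) 0 := by
    rcases Nat.eq_or_lt_of_le hg with he | hlt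
    · have : min c (Z - K) + K + 1 = Z + 1 := by omega
      rw [this, augL_get_last arr]; omega
    · have hgc : min c (Z - K) = c := by omega
      have hzlt : c + K < Z := by omega
      rw [hgc, augL_get_mid arr (c + K + 1) (by omega) (by omega)]
      have hcj : zcnt arr 0 j ≤ c + K := by
        have := zcnt_split arr (Nat.zero_le i) hij
        omega
      by_contra hcon
      push_neg at hcon
      have hjlt : (zidx arr 0)[c + K + 1 - 1]'(by omega) < j := by
        have : c + K + 1 - 1 = c + K := by omega
        omega
      have := sorted_getElem_lt (zidx arr 0) (zidx_sorted arr 0) (c + K) j (by omega)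
        (by simpa using hjlt)
      rw [cnt0] at this
      omega
  unfold Fspan
  omega

theorem sA_neg (arr : List Int) (k : Int) (hk : k < 0) : ∀ e, sA arr k e = e := by
  intro e
  induction e with
  | zero => rfl
  | succ e ih =>
    simp only [sA, ih]
    rw [if_pos (by have : (0 : Int) ≤ (zcnt arr e (e + 1) : Int) := by positivity
                   omega)]

theorem zeros_len (arr : List Int) :
    (((PySem.List.enumerate arr 0).filter (fun p => p.2 ≠ 1)).map (·.1)).length
      = (zidx arr 0).length := by
  have h := zeros_eq arr 0
  simp only [Nat.cast_zero] at h
  rw [h]; simp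

theorem B_neg (arr : List Int) (k : Int) (hk : k < 0) :
    find_longest_substring_with_ones_after_replacement_alt arr k = 0 := by
  unfold find_longest_substring_with_ones_after_replacement_alt
  rw [if_pos hk]

theorem B_all (arr : List Int) (k : Int) (hk : ¬ k < 0)
    (hZ : (((zidx arr 0).length : Int) ≤ k)) :
    find_longest_substring_with_ones_after_replacement_alt arr k = (arr.length : Int) := by
  unfold find_longest_substring_with_ones_after_replacement_alt
  rw [if_neg hk]
  simp only [zeros_len]
  rw [if_pos hZ]

theorem B_main (arr : List Int) (k : Int) (K : Nat) (hk : ¬ k < 0) (hK : (K : Int) = k)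
    (hKZ : K < (zidx arr 0).length) :
    find_longest_substring_with_ones_after_replacement_alt arr k
      = match (List.range ((zidx arr 0).length - K + 1)).map (Fspan arr K) with
        | [] => 0
        | x :: t => t.foldl max x := by
  unfold find_longest_substring_with_ones_after_replacement_alt
  rw [if_neg hk]
  have hzeq := zeros_eq arr 0
  simp only [Nat.cast_zero] at hzeq
  simp only [hzeq, List.length_map]
  rw [if_neg (by omega)]
  have haug : [-1] ++ (zidx arr 0).map (fun i : Nat => (i : Int)) ++ [(arr.length : Int)]
      = augL arr := by simp [augL]
  rw [haug, PySem.List.pyRange_one]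
  have hlen : ((((zidx arr 0).length : Int)) - k + 1 - 0).toNat = (zidx arr 0).length - K + 1 := by
    omega
  rw [hlen, List.map_map]
  have hfun : ∀ t ∈ List.range ((zidx arr 0).length - K + 1),
      ((fun j => PySem.List.pyGetD (augL arr) (j + k + 1) 0 - PySem.List.pyGetD (augL arr) j 0 - 1)
        ∘ (fun t : Nat => (0 : Int) + t)) t = Fspan arr K t := by
    intro t _
    simp only [Function.comp_apply, zero_add]
    have h1 : (t : Int) + k + 1 = ((t + K + 1 : Nat) : Int) := by push_cast; omega
    rw [h1, PySem.List.pyGetD_natCast, PySem.List.pyGetD_natCast]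
    simp [Fspan]
  rw [List.map_congr_left hfun]

theorem foldl_max_le_of (x b : Int) (t : List Int) (hx : x ≤ b) (ht : ∀ y ∈ t, y ≤ b) :
    t.foldl max x ≤ b := by
  rcases PySem.List.foldl_max_mem t x with h | h
  · omega
  · exact ht _ h

theorem main_eq (arr : List Int) (k : Int) :
    find_longest_substring_with_ones_after_replacement arr k
      = find_longest_substring_with_ones_after_replacement_alt arr k := by
  by_cases hk : k < 0
  · rw [A_eq, B_neg arr k hk, sA_neg arr k hk]
    simp
  · have hk0 : 0 ≤ k := by omega
    set K := k.toNat with hKdef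
    have hK : (K : Int) = k := Int.toNat_of_nonneg hk0
    set Z := (zidx arr 0).length with hZdef
    by_cases hZ : (Z : Int) ≤ k
    · rw [A_eq, B_all arr k hk hZ]
      have hs0 : sA arr k arr.length = 0 := by
        by_contra h
        have h1 := sA_invalid arr k arr.length 0 (by omega)
        have h2 : zcnt arr 0 arr.length = Z := (zidx_len arr 0).symm
        rw [h2] at h1
        omega
      rw [hs0]
      simp
    · have hKZ : K < Z := by omega
      rw [A_eq, B_main arr k K hk hK hKZ]
      have hne : (List.range (Z - K + 1)).map (Fspan arr K) ≠ [] := by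
        simp [List.range_succ_eq_map]
      obtain ⟨x, t, hxt⟩ := List.exists_cons_of_ne_nil hne
      rw [hxt]
      show (arr.length : Int) - (sA arr k arr.length : Int) = t.foldl max x
      have hmem_le : ∀ y ∈ x :: t, y ≤ (arr.length : Int) - sA arr k arr.length := by
        intro y hy
        rw [← hxt] at hy
        obtain ⟨jn, hjn, rfl⟩ := List.mem_map.mp hy
        have hjn' : jn ≤ Z - K := by
          have := List.mem_range.mp hjn; omega
        exact span_le arr k K jn hK hKZ hjn'
      have hle : t.foldl max x ≤ (arr.length : Int) - sA arr k arr.length :=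
        foldl_max_le_of x _ t (hmem_le x (by simp)) (fun y hy => hmem_le y (by simp [hy]))
      have hge : (arr.length : Int) - sA arr k arr.length ≤ t.foldl max x := by
        have hrev : ∀ i j : Nat, i ≤ j → j ≤ arr.length → (zcnt arr i j : Int) ≤ k →
            (j : Int) - (i : Int) ≤ t.foldl max x := by
          intro i j hij hjn hv
          obtain ⟨jn, hjn2, hsp⟩ := rev_span arr k K hK hKZ i j hij hjn hv
          have hmem : Fspan arr K jn ∈ x :: t := by
            rw [← hxt]
            exact List.mem_map.mpr ⟨jn, List.mem_range.mpr (by omega), rfl⟩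
          have := PySem.List.le_foldl_max t x
          rcases List.mem_cons.mp hmem with h | h
          · subst h; omega
          · have := this.2 _ h; omega
        rcases sA_achiev arr k arr.length with h | ⟨i, j, h1, h2, h3, h4⟩
        · have h0 := hrev 0 0 le_rfl (Nat.zero_le _) (by simp [zcnt_self]; omega)
          rw [h] at *
          simpa using h0
        · have := hrev i j h1 h2 h4
          have h5 := sA_le arr k arr.length
          omega
      omega

-- ===== VERDICT (by name: the statement is the Claim_ definition above) =====
theorem find_longest_substring_with_ones_after_replacement_spec : Claim_equal_find_longest_substring_with_ones_after_replacement := by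
  intro arr k _
  unfold Spec_find_longest_substring_with_ones_after_replacement
  exact main_eq arr k
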